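-- pv_equiv track=rewrite | github.com/nandishstocks1988-sketch/DataGeneratorApp | backend/generator.py | best_match_rows
-- ===== SOURCE A (Python) =====
-- from itertools import combinations
--
-- def best_match_rows(rows, filters):
--     # Try all subsets of filters (excluding empty set), most specific first
--     filter_keys = [k for k, v in filters.items() if v]
--     n = len(filter_keys)
--     for r in range(n, 0, -1):
--         for combo in combinations(filter_keys, r):
--             matched = [row for row in rows if all(row.get(k, '') in filters[k] for k in combo)]
--             if matched:
--                 return matched
--     return []
-- ===== SOURCE B (Python) =====
-- def best_match_rows(rows, filters):
--     # One pass: compute each row's satisfied-filter index set; keep the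
--     # (max-size, lexicographically-first) set; return rows matching exactly it.
--     keys = [k for k, v in filters.items() if v]
--     best = None
--     sets = []
--     for row in rows:
--         s = tuple(i for i, k in enumerate(keys) if row.get(k, '') in filters[k])
--         sets.append(s)
--         if s and (best is None or (-len(s), s) < (-len(best), best)):
--             best = s
--     if best is None:
--         return []
--     return [row for row, s in zip(rows, sets) if s == best]
-- ===== Notes on version B (the rewrite author's own statement) =====
-- stated objective: faster
-- what changed: Replaces the exponential enumeration of all filter subsets (largest first, itertools order) by a single pass that computes each row's satisfied-filter index set once and keeps the (max-size, lexicographically-first) set, then returns the rows whose set equals it.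
import Mathlib
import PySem

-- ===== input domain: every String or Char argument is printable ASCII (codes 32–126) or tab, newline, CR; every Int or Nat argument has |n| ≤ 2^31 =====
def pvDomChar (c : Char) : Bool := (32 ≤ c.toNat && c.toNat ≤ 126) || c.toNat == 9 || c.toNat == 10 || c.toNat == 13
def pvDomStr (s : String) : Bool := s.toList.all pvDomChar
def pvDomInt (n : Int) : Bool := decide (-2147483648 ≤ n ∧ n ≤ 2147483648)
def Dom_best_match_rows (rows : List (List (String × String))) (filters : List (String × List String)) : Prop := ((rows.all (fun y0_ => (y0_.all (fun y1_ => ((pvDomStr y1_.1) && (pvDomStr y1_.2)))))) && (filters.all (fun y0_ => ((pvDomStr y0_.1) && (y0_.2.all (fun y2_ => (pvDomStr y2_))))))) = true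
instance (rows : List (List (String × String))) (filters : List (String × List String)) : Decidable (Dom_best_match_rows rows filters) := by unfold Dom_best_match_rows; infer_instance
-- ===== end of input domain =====

-- B replaces A's exponential subset enumeration by one pass over the rows (satisfied-filter
-- index sets, keep the (max-size, lexicographically-first) one); proved to return A's exact value.

-- shared helper: `row.get(k, '') in filters[k]` (both Pythons contain this exact expression)
def pvSat (filters : List (String × List String)) (row : List (String × String)) (k : String) : Bool :=
  ((PySem.Dict.mk filters).getD k []).contains ((PySem.Dict.mk row).getD k "")

-- shared helper: `[k for k, v in filters.items() if v]` (identical comprehension in both Pythons)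
def pvFilterKeys (filters : List (String × List String)) : List String :=
  (filters.filter (fun kv => !kv.2.isEmpty)).map Prod.fst

-- ===== PORT A =====
-- itertools.combinations(l, r), in itertools' lexicographic order
def pvCombos {α : Type} : List α → Nat → List (List α)
  | _, 0 => [[]]
  | [], _ + 1 => []
  | x :: xs, r + 1 => (pvCombos xs r).map (x :: ·) ++ pvCombos xs (r + 1)
  termination_by l _ => l.length
  decreasing_by all_goals simp

-- `[row for row in rows if all(row.get(k, '') in filters[k] for k in combo)]`
def pvMatched (rows : List (List (String × String))) (filters : List (String × List String))
    (combo : List String) : List (List (String × String)) :=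
  rows.filter (fun row => combo.all (fun k => pvSat filters row k))

-- inner `for combo in combinations(filter_keys, r): … if matched: return matched`
def pvInner (rows : List (List (String × String))) (filters : List (String × List String)) :
    List (List String) → Option (List (List (String × String)))
  | [] => none
  | c :: cs =>
    let matched := pvMatched rows filters c
    if matched.isEmpty then pvInner rows filters cs else some matched

-- outer `for r in range(n, 0, -1)`
def pvOuter (rows : List (List (String × String))) (filters : List (String × List String))
    (keys : List String) : List Int → List (List (String × String))
  | [] => []
  | r :: rs =>
    match pvInner rows filters (pvCombos keys r.toNat) with
    | some m => m
    | none => pvOuter rows filters keys rs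

def best_match_rows (rows : List (List (String × String))) (filters : List (String × List String)) : List (List (String × String)) :=
  let filter_keys := pvFilterKeys filters
  pvOuter rows filters filter_keys (PySem.List.pyRange (filter_keys.length : Int) 0 (-1))

-- ===== PORT B =====
-- `tuple(i for i, k in enumerate(keys) if row.get(k, '') in filters[k])`
def pvRowSet (filters : List (String × List String)) (keys : List String)
    (row : List (String × String)) : List Int :=
  (PySem.List.enumerate keys 0).filterMap (fun ik => if pvSat filters row ik.2 then some ik.1 else none)

-- Python tuple `<` (lexicographic) on the index tuples
def pvLexLt : List Int → List Int → Bool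
  | [], [] => false
  | [], _ :: _ => true
  | _ :: _, [] => false
  | a :: as, b :: bs => a < b || (a == b && pvLexLt as bs)

-- `(-len(s), s) < (-len(t), t)`
def pvKeyLt (s t : List Int) : Bool :=
  decide (t.length < s.length) || (s.length == t.length && pvLexLt s t)

-- `if s and (best is None or (-len(s), s) < (-len(best), best)): best = s`
def pvStep (best : Option (List Int)) (s : List Int) : Option (List Int) :=
  match best with
  | none => if s.isEmpty then none else some s
  | some b => if !s.isEmpty && pvKeyLt s b then some s else some b

-- the `for row in rows` loop of B, carrying (best, sets)
def pvLoop (filters : List (String × List String)) (keys : List String) :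
    List (List (String × String)) → Option (List Int) → List (List Int) →
    Option (List Int) × List (List Int)
  | [], best, sets => (best, sets)
  | row :: rest, best, sets =>
    let s := pvRowSet filters keys row
    pvLoop filters keys rest (pvStep best s) (sets ++ [s])

def best_match_rows_alt (rows : List (List (String × String))) (filters : List (String × List String)) : List (List (String × String)) :=
  let keys := pvFilterKeys filters
  match pvLoop filters keys rows none [] with
  | (none, _) => []
  | (some b, sets) => ((rows.zip sets).filter (fun rs => rs.2 == b)).map (·.1)

-- ===== PRECONDITION & SPEC =====
def Spec_best_match_rows (rows : List (List (String × String))) (filters : List (String × List String)) (out : List (List (String × String))) : Prop := out = best_match_rows_alt rows filters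
instance (rows : List (List (String × String))) (filters : List (String × List String)) (out : List (List (String × String))) : Decidable (Spec_best_match_rows rows filters out) := by unfold Spec_best_match_rows; infer_instance

-- ===== CLAIM (what is proved, stated in full; the proofs are below) =====
def Claim_equal_best_match_rows : Prop := ∀ (rows : List (List (String × String))) (filters : List (String × List String)), Dom_best_match_rows rows filters → Spec_best_match_rows rows filters (best_match_rows rows filters)

-- ===== LEMMAS AND PROOFS =====

-- the satisfied-filter ROW SET as a list of (index, key) pairs (proof-side view of pvRowSet)
def pvSE (filters : List (String × List String)) (keys : List String)
    (row : List (String × String)) : List (Int × String) :=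
  (PySem.List.enumerate keys 0).filter (fun ik => pvSat filters row ik.2)

-- order used to compare index-combos of pairs: strictly increasing first components
def pvFstLt (p q : Int × String) : Prop := p.1 < q.1

-- ---- basic order facts ----
theorem pvLexLt_irrefl : ∀ s : List Int, pvLexLt s s = false := by
  intro s
  induction s with
  | nil => rfl
  | cons a as ih => simp [pvLexLt, ih]


theorem pvLexLt_trans : ∀ a b c : List Int, pvLexLt a b = true → pvLexLt b c = true → pvLexLt a c = true := by
  intro a
  induction a with
  | nil =>
    intro b c h1 h2
    cases b with
    | nil => exact h2
    | cons y ys => cases c with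
      | nil => simp [pvLexLt] at h2
      | cons z zs => simp [pvLexLt]
  | cons x xs ih =>
    intro b c h1 h2
    cases b with
    | nil => simp [pvLexLt] at h1
    | cons y ys =>
      cases c with
      | nil => simp [pvLexLt] at h2
      | cons z zs =>
        simp only [pvLexLt, Bool.or_eq_true, Bool.and_eq_true, decide_eq_true_eq, beq_iff_eq] at h1 h2 ⊢
        rcases h1 with h1 | ⟨rfl, h1⟩
        · rcases h2 with h2 | ⟨rfl, h2⟩
          · exact Or.inl (lt_trans h1 h2)
          · exact Or.inl h1
        · rcases h2 with h2 | ⟨rfl, h2⟩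
          · exact Or.inl h2
          · exact Or.inr ⟨rfl, ih ys zs h1 h2⟩


theorem pvLexLt_cons (a : Int) (s t : List Int) : pvLexLt (a :: s) (a :: t) = pvLexLt s t := by
  simp [pvLexLt]


theorem pvKeyLt_irrefl (s : List Int) : pvKeyLt s s = false := by
  simp [pvKeyLt, pvLexLt_irrefl]


theorem pvKeyLt_trans (a b c : List Int) (h1 : pvKeyLt a b = true) (h2 : pvKeyLt b c = true) : pvKeyLt a c = true := by
  simp only [pvKeyLt, Bool.or_eq_true, Bool.and_eq_true, decide_eq_true_eq, beq_iff_eq] at h1 h2 ⊢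
  rcases h1 with h1 | ⟨e1, h1⟩
  · rcases h2 with h2 | ⟨e2, h2⟩
    · exact Or.inl (by omega)
    · exact Or.inl (by omega)
  · rcases h2 with h2 | ⟨e2, h2⟩
    · exact Or.inl (by omega)
    · exact Or.inr ⟨by omega, pvLexLt_trans _ _ _ h1 h2⟩



-- ---- pvRowSet vs pvSE ----
theorem filterMap_fst (p : Int × String → Bool) : ∀ L : List (Int × String),
    L.filterMap (fun ik => if p ik then some ik.1 else none) = (L.filter p).map (·.1) := by
  intro L
  induction L with
  | nil => rfl
  | cons a L ih =>
    by_cases hp : p a = true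
    · simp [hp, ih]
    · simp [hp, ih]


theorem pvRowSet_eq (filters : List (String × List String)) (keys : List String) (row : List (String × String)) :
    pvRowSet filters keys row = (pvSE filters keys row).map (·.1) := by
  exact filterMap_fst _ _


theorem pvSE_sublist (filters : List (String × List String)) (keys : List String) (row : List (String × String)) :
    List.Sublist (pvSE filters keys row) (PySem.List.enumerate keys 0) := by
  exact List.filter_sublist


theorem pvRowSet_length (filters : List (String × List String)) (keys : List String) (row : List (String × String)) :
    (pvRowSet filters keys row).length = (pvSE filters keys row).length := by
  rw [pvRowSet_eq]; simp


-- ---- combinations ----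
theorem pvCombos_map {α β : Type} (f : α → β) : ∀ (l : List α) (r : Nat),
    pvCombos (l.map f) r = (pvCombos l r).map (List.map f) := by
  intro l
  induction l with
  | nil =>
    intro r
    cases r with
    | zero => simp [pvCombos]
    | succ r => simp [pvCombos]
  | cons x xs ih =>
    intro r
    cases r with
    | zero => simp [pvCombos]
    | succ r =>
      simp only [List.map_cons, pvCombos, ih, List.map_append, List.map_map]
      rfl


theorem mem_pvCombos {α : Type} : ∀ (l : List α) (r : Nat) (c : List α),
    c ∈ pvCombos l r ↔ List.Sublist c l ∧ c.length = r := by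
  intro l
  induction l with
  | nil =>
    intro r c
    cases r with
    | zero =>
      simp only [pvCombos, List.mem_singleton, List.sublist_nil]
      constructor
      · rintro rfl; exact ⟨rfl, rfl⟩
      · rintro ⟨rfl, _⟩; rfl
    | succ r =>
      simp only [pvCombos, List.not_mem_nil, false_iff, not_and, List.sublist_nil]
      rintro rfl
      simp
  | cons x xs ih =>
    intro r c
    cases r with
    | zero =>
      simp only [pvCombos, List.mem_singleton]
      constructor
      · rintro rfl; exact ⟨List.nil_sublist _, rfl⟩
      · rintro ⟨_, hlen⟩; exact List.length_eq_zero_iff.mp hlen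
    | succ r =>
      simp only [pvCombos, List.mem_append, List.mem_map]
      constructor
      · rintro (⟨s, hs, rfl⟩ | h)
        · rcases (ih r s).mp hs with ⟨hsub, hlen⟩
          exact ⟨List.Sublist.cons₂ _ hsub, by simp [hlen]⟩
        · rcases (ih (r + 1) c).mp h with ⟨hsub, hlen⟩
          exact ⟨List.Sublist.cons _ hsub, hlen⟩
      · rintro ⟨hsub, hlen⟩
        rcases List.sublist_cons_iff.mp hsub with h | ⟨c', rfl, hc'⟩
        · exact Or.inr ((ih (r + 1) c).mpr ⟨h, hlen⟩)
        · exact Or.inl ⟨c', (ih r c').mpr ⟨hc', by simpa using hlen⟩, rfl⟩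


theorem pvCombos_pairwise : ∀ (l : List (Int × String)) (r : Nat), l.Pairwise pvFstLt →
    (pvCombos l r).Pairwise (fun c d => pvLexLt (c.map (·.1)) (d.map (·.1)) = true) := by
  intro l
  induction l with
  | nil =>
    intro r _
    cases r with
    | zero => simp [pvCombos]
    | succ r => simp [pvCombos]
  | cons x xs ih =>
    intro r hp
    rcases List.pairwise_cons.mp hp with ⟨hx, hxs⟩
    cases r with
    | zero => simp [pvCombos]
    | succ r =>
      simp only [pvCombos]
      apply List.pairwise_append.mpr
      refine ⟨?_, ih (r + 1) hxs, ?_⟩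
      · rw [List.pairwise_map]
        apply (ih r hxs).imp
        intro c d h
        simpa [pvLexLt_cons] using h
      · rintro c' hc' d hd
        rcases List.mem_map.mp hc' with ⟨c, _, rfl⟩
        rcases (mem_pvCombos xs (r + 1) d).mp hd with ⟨hsub, hlen⟩
        cases d with
        | nil => simp at hlen
        | cons q d' =>
          have hq : q ∈ xs := hsub.subset (by simp)
          simp only [List.map_cons, pvLexLt, Bool.or_eq_true, Bool.and_eq_true,
            decide_eq_true_eq, beq_iff_eq]
          exact Or.inl (hx q hq)


-- two sublists of a strictly-increasing list, one a subset of the other, are in sublist relation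
theorem sublist_of_subset : ∀ (l c d : List (Int × String)), l.Pairwise pvFstLt →
    List.Sublist c l → List.Sublist d l → c ⊆ d → List.Sublist c d := by
  intro l
  induction l with
  | nil =>
    intro c d _ hc _ _
    simpa using List.sublist_nil.mp hc ▸ List.nil_sublist d
  | cons p l ih =>
    intro c d hp hc hd hcd
    rcases List.pairwise_cons.mp hp with ⟨hpl, hl⟩
    have hpnotl : p ∉ l := fun hmem => lt_irrefl p.1 (hpl p hmem)
    rcases List.sublist_cons_iff.mp hc with hc' | ⟨c', rfl, hc'⟩
    · rcases List.sublist_cons_iff.mp hd with hd' | ⟨d', rfl, hd'⟩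
      · exact ih c d hl hc' hd' hcd
      · have hcd' : c ⊆ d' := by
          intro x hx
          rcases List.mem_cons.mp (hcd hx) with rfl | h
          · exact absurd (hc'.subset hx) hpnotl
          · exact h
        exact (ih c d' hl hc' hd' hcd').cons p
    · rcases List.sublist_cons_iff.mp hd with hd' | ⟨d', rfl, hd'⟩
      · exact absurd (hd'.subset (hcd (by simp))) hpnotl
      · have hcd' : c' ⊆ d' := by
          intro x hx
          rcases List.mem_cons.mp (hcd (List.mem_cons_of_mem p hx)) with rfl | h
          · exact absurd (hc'.subset hx) hpnotl
          · exact h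
        exact (ih c' d' hl hc' hd' hcd').cons₂ p


-- a sublist of a strictly-increasing list is determined by its first components
theorem eq_of_map_fst_eq : ∀ (l c d : List (Int × String)), l.Pairwise pvFstLt →
    List.Sublist c l → List.Sublist d l → c.map (·.1) = d.map (·.1) → c = d := by
  intro l
  induction l with
  | nil =>
    intro c d _ hc hd _
    rw [List.sublist_nil.mp hc, List.sublist_nil.mp hd]
  | cons p l ih =>
    intro c d hp hc hd hmap
    rcases List.pairwise_cons.mp hp with ⟨hpl, hl⟩
    rcases List.sublist_cons_iff.mp hc with hc' | ⟨c', rfl, hc'⟩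
    · rcases List.sublist_cons_iff.mp hd with hd' | ⟨d', rfl, hd'⟩
      · exact ih c d hl hc' hd' hmap
      · -- c <+ l, d = p :: d' : c's first fst equals p.1 but all of c's elements are beyond p
        cases c with
        | nil => simp at hmap
        | cons q c'' =>
          have hq : q ∈ l := hc'.subset (by simp)
          have : p.1 < q.1 := hpl q hq
          simp only [List.map_cons, List.cons.injEq] at hmap
          omega
    · rcases List.sublist_cons_iff.mp hd with hd' | ⟨d', rfl, hd'⟩
      · cases d with
        | nil => simp at hmap
        | cons q d'' =>
          have hq : q ∈ l := hd'.subset (by simp)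
          have : p.1 < q.1 := hpl q hq
          simp only [List.map_cons, List.cons.injEq] at hmap
          omega
      · simp only [List.map_cons, List.cons.injEq] at hmap
        rw [ih c' d' hl hc' hd' hmap.2]


-- ---- matched characterisation ----
theorem matched_all_iff (_rows : List (List (String × String))) (filters : List (String × List String))
    (keys : List String) (c : List (Int × String)) (row : List (String × String))
    (hc : List.Sublist c (PySem.List.enumerate keys 0)) :
    ((c.map (·.2)).all (fun k => pvSat filters row k) = true) ↔ c ⊆ pvSE filters keys row := by
  simp only [List.all_map, List.all_eq_true, Function.comp]
  constructor
  · intro h ik hik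
    exact List.mem_filter.mpr ⟨hc.subset hik, h ik hik⟩
  · intro h ik hik
    exact (List.mem_filter.mp (h hik)).2


theorem matched_isEmpty_iff (rows : List (List (String × String))) (filters : List (String × List String))
    (_keys : List String) (c : List (Int × String)) :
    (pvMatched rows filters (c.map (·.2))).isEmpty = false ↔
      ∃ row ∈ rows, (c.map (·.2)).all (fun k => pvSat filters row k) = true := by
  rw [List.isEmpty_eq_false_iff, pvMatched]
  simp only [ne_eq, List.filter_eq_nil_iff, not_forall]
  constructor
  · rintro ⟨row, hrow, hs⟩
    exact ⟨row, hrow, by simpa using hs⟩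
  · rintro ⟨row, hrow, hs⟩
    exact ⟨row, hrow, by simpa using hs⟩


-- ---- inner loop ----
theorem pvInner_none (rows : List (List (String × String))) (filters : List (String × List String)) :
    ∀ L : List (List (Int × String)),
    (∀ c ∈ L, (pvMatched rows filters (c.map (·.2))).isEmpty = true) →
    pvInner rows filters (L.map (List.map (·.2))) = none := by
  intro L
  induction L with
  | nil => intro _; rfl
  | cons c L ih =>
    intro h
    simp only [List.map_cons, pvInner, h c (by simp)]
    exact ih (fun c' hc' => h c' (List.mem_cons_of_mem _ hc'))


theorem pvInner_first (rows : List (List (String × String))) (filters : List (String × List String)) :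
    ∀ (L : List (List (Int × String))) (cb : List (Int × String)),
    L.Pairwise (fun c d => pvLexLt (c.map (·.1)) (d.map (·.1)) = true) →
    cb ∈ L →
    (pvMatched rows filters (cb.map (·.2))).isEmpty = false →
    (∀ c ∈ L, (pvMatched rows filters (c.map (·.2))).isEmpty = false →
        pvLexLt (c.map (·.1)) (cb.map (·.1)) = false) →
    pvInner rows filters (L.map (List.map (·.2))) = some (pvMatched rows filters (cb.map (·.2))) := by
  intro L
  induction L with
  | nil => intro cb _ hcb; simp at hcb
  | cons c L ih =>
    intro cb hpw hcb hne hmin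
    rcases List.pairwise_cons.mp hpw with ⟨hcL, hL⟩
    by_cases he : (pvMatched rows filters (c.map (·.2))).isEmpty = true
    · have hcbL : cb ∈ L := by
        rcases List.mem_cons.mp hcb with rfl | h
        · rw [hne] at he; exact absurd he (by simp)
        · exact h
      simp only [List.map_cons, pvInner, he]
      exact ih cb hL hcbL hne (fun c' hc' => hmin c' (List.mem_cons_of_mem _ hc'))
    · have hce : (pvMatched rows filters (c.map (·.2))).isEmpty = false := by
        simpa using he
      have hcc : c = cb := by
        rcases List.mem_cons.mp hcb with rfl | h
        · rfl
        · have h1 := hcL cb h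
          have h2 := hmin c (by simp) hce
          rw [h1] at h2
          exact absurd h2 (by simp)
      simp only [List.map_cons, pvInner, hce]
      rw [hcc]
      simp


-- ---- outer loop ----
theorem pvOuter_nil (rows : List (List (String × String))) (filters : List (String × List String))
    (keys : List String) : ∀ rs : List Int,
    (∀ r ∈ rs, pvInner rows filters (pvCombos keys r.toNat) = none) →
    pvOuter rows filters keys rs = [] := by
  intro rs
  induction rs with
  | nil => intro _; rfl
  | cons r rs ih =>
    intro h
    simp only [pvOuter, h r (by simp)]
    exact ih (fun r' hr' => h r' (List.mem_cons_of_mem _ hr'))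


theorem pvOuter_hit (rows : List (List (String × String))) (filters : List (String × List String))
    (keys : List String) (m : Nat) (res : List (List (String × String))) (hm : 1 ≤ m) :
    ∀ k : Nat, m ≤ k →
    (∀ r : Nat, m < r → pvInner rows filters (pvCombos keys r) = none) →
    pvInner rows filters (pvCombos keys m) = some res →
    pvOuter rows filters keys (PySem.List.pyRange (k : Int) 0 (-1)) = res := by
  intro k
  induction k with
  | zero => intro h; omega
  | succ k ih =>
    intro _ hnone hsome
    have hcons : PySem.List.pyRange ((k + 1 : Nat) : Int) 0 (-1) =
        ((k + 1 : Nat) : Int) :: PySem.List.pyRange (((k + 1 : Nat) : Int) - 1) 0 (-1) :=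
      PySem.List.pyRange_neg_one_cons (by push_cast; omega)
    rw [hcons]
    have htn : (((k + 1 : Nat) : Int)).toNat = k + 1 := by omega
    by_cases hk : m = k + 1
    · subst hk
      simp only [pvOuter, htn, hsome]
    · have hlt : m ≤ k := by omega
      have hn := hnone (k + 1) (by omega)
      simp only [pvOuter, htn, hn]
      have : (((k + 1 : Nat) : Int)) - 1 = ((k : Nat) : Int) := by push_cast; ring
      rw [this]
      exact ih hlt hnone hsome


-- ---- B's loop ----
theorem pvLoop_eq (filters : List (String × List String)) (keys : List String) :
    ∀ (rs : List (List (String × String))) (best : Option (List Int)) (sets : List (List Int)),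
    pvLoop filters keys rs best sets =
      (rs.foldl (fun b row => pvStep b (pvRowSet filters keys row)) best,
       sets ++ rs.map (pvRowSet filters keys)) := by
  intro rs
  induction rs with
  | nil => intro best sets; simp [pvLoop]
  | cons row rest ih =>
    intro best sets
    simp [pvLoop, ih, List.foldl_cons]


theorem foldStep_some (filters : List (String × List String)) (keys : List String) :
    ∀ (rs : List (List (String × String))) (b0 : List Int), b0 ≠ [] →
    ∃ b, rs.foldl (fun b row => pvStep b (pvRowSet filters keys row)) (some b0) = some b ∧
      b ≠ [] ∧ (b = b0 ∨ ∃ row ∈ rs, pvRowSet filters keys row = b) ∧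
      (b = b0 ∨ pvKeyLt b b0 = true) ∧
      (∀ row ∈ rs, pvRowSet filters keys row ≠ [] → pvKeyLt (pvRowSet filters keys row) b = false) := by
  intro rs
  induction rs with
  | nil =>
    intro b0 hb0
    exact ⟨b0, rfl, hb0, Or.inl rfl, Or.inl rfl, by simp⟩
  | cons row rest ih =>
    intro b0 hb0
    simp only [List.foldl_cons]
    by_cases hcond : (!(pvRowSet filters keys row).isEmpty && pvKeyLt (pvRowSet filters keys row) b0) = true
    · obtain ⟨hs, hkl⟩ : pvRowSet filters keys row ≠ [] ∧ pvKeyLt (pvRowSet filters keys row) b0 = true := by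
        simpa using hcond
      have hstep : pvStep (some b0) (pvRowSet filters keys row) = some (pvRowSet filters keys row) := by
        simp [pvStep, hcond]
      rw [hstep]
      rcases ih (pvRowSet filters keys row) hs with ⟨b, hfold, hbne, hmem, hle, hmin⟩
      refine ⟨b, hfold, hbne, ?_, ?_, ?_⟩
      · rcases hmem with rfl | ⟨r', hr', hrS⟩
        · exact Or.inr ⟨row, by simp⟩
        · exact Or.inr ⟨r', List.mem_cons_of_mem _ hr', hrS⟩
      · rcases hle with rfl | hlt
        · exact Or.inr hkl
        · exact Or.inr (pvKeyLt_trans _ _ _ hlt hkl)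
      · intro r' hr' hne'
        rcases List.mem_cons.mp hr' with rfl | hmem'
        · rcases hle with rfl | hlt
          · exact pvKeyLt_irrefl _
          · cases hc : pvKeyLt (pvRowSet filters keys r') b with
            | false => rfl
            | true =>
              have h3 := pvKeyLt_trans _ _ _ hc hlt
              rw [pvKeyLt_irrefl] at h3
              exact absurd h3 (by simp)
        · exact hmin r' hmem' hne'
    · have hstep : pvStep (some b0) (pvRowSet filters keys row) = some b0 := by
        simp [pvStep, hcond]
      rw [hstep]
      rcases ih b0 hb0 with ⟨b, hfold, hbne, hmem, hle, hmin⟩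
      refine ⟨b, hfold, hbne, ?_, hle, ?_⟩
      · rcases hmem with rfl | ⟨r', hr', hrS⟩
        · exact Or.inl rfl
        · exact Or.inr ⟨r', List.mem_cons_of_mem _ hr', hrS⟩
      · intro r' hr' hne'
        rcases List.mem_cons.mp hr' with rfl | hmem'
        · have hklf : pvKeyLt (pvRowSet filters keys r') b0 = false := by
            cases hkl : pvKeyLt (pvRowSet filters keys r') b0 with
            | false => rfl
            | true => exact absurd (by simp [hkl, hne']) hcond
          rcases hle with rfl | hlt
          · exact hklf
          · cases hc : pvKeyLt (pvRowSet filters keys r') b with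
            | false => rfl
            | true =>
              have h3 := pvKeyLt_trans _ _ _ hc hlt
              rw [h3] at hklf
              exact absurd hklf (by simp)
        · exact hmin r' hmem' hne'

theorem foldStep_main (filters : List (String × List String)) (keys : List String) :
    ∀ rs : List (List (String × String)),
    (rs.foldl (fun b row => pvStep b (pvRowSet filters keys row)) none = none ∧
       ∀ row ∈ rs, pvRowSet filters keys row = []) ∨
    (∃ b, rs.foldl (fun b row => pvStep b (pvRowSet filters keys row)) none = some b ∧
       b ≠ [] ∧ (∃ row ∈ rs, pvRowSet filters keys row = b) ∧
       (∀ row ∈ rs, pvRowSet filters keys row ≠ [] → pvKeyLt (pvRowSet filters keys row) b = false)) := by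
  intro rs
  induction rs with
  | nil => exact Or.inl ⟨rfl, by simp⟩
  | cons row rest ih =>
    simp only [List.foldl_cons]
    by_cases hs : pvRowSet filters keys row = []
    · have hstep : pvStep none (pvRowSet filters keys row) = none := by simp [pvStep, hs]
      rw [hstep]
      rcases ih with ⟨h1, h2⟩ | ⟨b, h1, h2, h3, h4⟩
      · refine Or.inl ⟨h1, ?_⟩
        intro r' hr'
        rcases List.mem_cons.mp hr' with rfl | hmem
        · exact hs
        · exact h2 r' hmem
      · refine Or.inr ⟨b, h1, h2, ?_, ?_⟩
        · rcases h3 with ⟨r', hr', hrS⟩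
          exact ⟨r', List.mem_cons_of_mem _ hr', hrS⟩
        · intro r' hr' hne'
          rcases List.mem_cons.mp hr' with rfl | hmem
          · exact absurd hs hne'
          · exact h4 r' hmem hne'
    · have hstep : pvStep none (pvRowSet filters keys row) = some (pvRowSet filters keys row) := by
        simp [pvStep, hs]
      rw [hstep]
      rcases foldStep_some filters keys rest (pvRowSet filters keys row) hs with
        ⟨b, hfold, hbne, hmem, hle, hmin⟩
      refine Or.inr ⟨b, hfold, hbne, ?_, ?_⟩
      · rcases hmem with rfl | ⟨r', hr', hrS⟩
        · exact ⟨row, by simp⟩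
        · exact ⟨r', List.mem_cons_of_mem _ hr', hrS⟩
      · intro r' hr' hne'
        rcases List.mem_cons.mp hr' with rfl | hmem'
        · rcases hle with rfl | hlt
          · exact pvKeyLt_irrefl _
          · cases hc : pvKeyLt (pvRowSet filters keys r') b with
            | false => rfl
            | true =>
              have h3 := pvKeyLt_trans _ _ _ hc hlt
              rw [pvKeyLt_irrefl] at h3
              exact absurd h3 (by simp)
        · exact hmin r' hmem' hne'


theorem zip_filter (filters : List (String × List String)) (keys : List String) (b : List Int) :
    ∀ rs : List (List (String × String)),
    (((rs.zip (rs.map (pvRowSet filters keys))).filter (fun p => p.2 == b)).map (·.1)) =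
      rs.filter (fun row => pvRowSet filters keys row == b) := by
  intro rs
  induction rs with
  | nil => rfl
  | cons row rest ih =>
    simp only [List.map_cons, List.zip_cons_cons, List.filter_cons]
    by_cases hb : (pvRowSet filters keys row == b) = true
    · simp [hb, ih]
    · simp [hb, ih]


-- ===== VERDICT (by name: the statement is the Claim_ definition above) =====
theorem best_match_rows_spec : Claim_equal_best_match_rows := by
  intro rows filters _hdom
  unfold Spec_best_match_rows
  show best_match_rows rows filters = best_match_rows_alt rows filters
  simp only [best_match_rows, best_match_rows_alt]
  rw [pvLoop_eq]
  have hEpw : (PySem.List.enumerate (pvFilterKeys filters) 0).Pairwise pvFstLt :=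
    PySem.List.pairwise_lt_enumerate _ _
  have hkeysE : (PySem.List.enumerate (pvFilterKeys filters) 0).map (·.2) = pvFilterKeys filters :=
    PySem.List.map_snd_enumerate _ _
  have hcombosE : ∀ r : Nat, pvCombos (pvFilterKeys filters) r =
      (pvCombos (PySem.List.enumerate (pvFilterKeys filters) 0) r).map (List.map (·.2)) := by
    intro r
    calc pvCombos (pvFilterKeys filters) r
        = pvCombos ((PySem.List.enumerate (pvFilterKeys filters) 0).map (·.2)) r := by rw [hkeysE]
      _ = (pvCombos (PySem.List.enumerate (pvFilterKeys filters) 0) r).map (List.map (·.2)) :=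
          pvCombos_map _ _ _
  rcases foldStep_main filters (pvFilterKeys filters) rows with ⟨hfold, hall⟩ |
    ⟨b, hfold, hbne, ⟨rw0, hrw0, hrwS⟩, hmin⟩
  · rw [hfold]
    apply pvOuter_nil
    intro r hr
    have hrmem := (PySem.List.mem_pyRange_neg_one).mp hr
    rw [hcombosE r.toNat]
    apply pvInner_none
    intro c hc
    rcases (mem_pvCombos _ _ c).mp hc with ⟨hsub, hlen⟩
    cases he : (pvMatched rows filters (c.map (·.2))).isEmpty with
    | true => rfl
    | false =>
      rcases (matched_isEmpty_iff rows filters (pvFilterKeys filters) c).mp he with ⟨row, hrow, hsat⟩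
      have hcsub := (matched_all_iff rows filters (pvFilterKeys filters) c row hsub).mp hsat
      have hSEnil : pvSE filters (pvFilterKeys filters) row = [] := by
        have h1 := hall row hrow
        rw [pvRowSet_eq] at h1
        exact List.map_eq_nil_iff.mp h1
      rw [hSEnil] at hcsub
      have : c = [] := List.subset_nil.mp hcsub
      rw [this] at hlen
      simp at hlen
      omega
  · rw [hfold]
    simp only [List.nil_append]
    rw [zip_filter]
    have hcbfst : (pvSE filters (pvFilterKeys filters) rw0).map (·.1) = b := by
      rw [← pvRowSet_eq, hrwS]
    have hcbsub : List.Sublist (pvSE filters (pvFilterKeys filters) rw0)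
        (PySem.List.enumerate (pvFilterKeys filters) 0) := pvSE_sublist _ _ _
    have hm1 : 1 ≤ b.length := by
      cases hb : b with
      | nil => exact absurd hb hbne
      | cons x xs => simp
    have hcblen : (pvSE filters (pvFilterKeys filters) rw0).length = b.length := by
      rw [← hcbfst, List.length_map]
    have hmn : b.length ≤ (pvFilterKeys filters).length := by
      have h1 := hcbsub.length_le
      rw [PySem.List.length_enumerate] at h1
      omega
    have hSlen : ∀ row ∈ rows, (pvSE filters (pvFilterKeys filters) row).length ≤ b.length := by
      intro row hrow
      by_cases hs : pvRowSet filters (pvFilterKeys filters) row = []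
      · have h1 : pvSE filters (pvFilterKeys filters) row = [] := by
          rw [pvRowSet_eq] at hs
          exact List.map_eq_nil_iff.mp hs
        simp [h1]
      · have hk := hmin row hrow hs
        simp only [pvKeyLt, Bool.or_eq_false_iff, decide_eq_false_iff_not] at hk
        have h2 := pvRowSet_length filters (pvFilterKeys filters) row
        omega
    have hsubeq : ∀ (c : List (Int × String)) (row : List (String × String)), row ∈ rows →
        List.Sublist c (PySem.List.enumerate (pvFilterKeys filters) 0) →
        c ⊆ pvSE filters (pvFilterKeys filters) row → b.length ≤ c.length →
        c = pvSE filters (pvFilterKeys filters) row := by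
      intro c row hrow hsub hcsub hlenc
      have h1 : List.Sublist c (pvSE filters (pvFilterKeys filters) row) :=
        sublist_of_subset _ c _ hEpw hsub (pvSE_sublist _ _ _) hcsub
      exact h1.eq_of_length_le (le_trans (hSlen row hrow) hlenc)
    have hnone : ∀ r : Nat, b.length < r →
        pvInner rows filters (pvCombos (pvFilterKeys filters) r) = none := by
      intro r hr
      rw [hcombosE r]
      apply pvInner_none
      intro c hc
      rcases (mem_pvCombos _ _ c).mp hc with ⟨hsub, hlen⟩
      cases he : (pvMatched rows filters (c.map (·.2))).isEmpty with
      | true => rfl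
      | false =>
        rcases (matched_isEmpty_iff rows filters (pvFilterKeys filters) c).mp he with ⟨row, hrow, hsat⟩
        have hcsub := (matched_all_iff rows filters (pvFilterKeys filters) c row hsub).mp hsat
        have h1 : List.Sublist c (pvSE filters (pvFilterKeys filters) row) :=
          sublist_of_subset _ c _ hEpw hsub (pvSE_sublist _ _ _) hcsub
        have h2 := h1.length_le
        have h3 := hSlen row hrow
        omega
    have hsome : pvInner rows filters (pvCombos (pvFilterKeys filters) b.length) =
        some (pvMatched rows filters ((pvSE filters (pvFilterKeys filters) rw0).map (·.2))) := by
      rw [hcombosE b.length]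
      apply pvInner_first rows filters _ (pvSE filters (pvFilterKeys filters) rw0)
      · exact pvCombos_pairwise _ b.length hEpw
      · exact (mem_pvCombos _ _ _).mpr ⟨hcbsub, hcblen⟩
      · rw [matched_isEmpty_iff rows filters (pvFilterKeys filters)]
        exact ⟨rw0, hrw0,
          (matched_all_iff rows filters (pvFilterKeys filters) _ rw0 hcbsub).mpr (fun ik h => h)⟩
      · intro c hcmem hcne
        rcases (mem_pvCombos _ _ c).mp hcmem with ⟨hsub, hlen⟩
        rcases (matched_isEmpty_iff rows filters (pvFilterKeys filters) c).mp hcne with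
          ⟨row, hrow, hsat⟩
        have hcsub := (matched_all_iff rows filters (pvFilterKeys filters) c row hsub).mp hsat
        have hceq : c = pvSE filters (pvFilterKeys filters) row :=
          hsubeq c row hrow hsub hcsub (by omega)
        have hSfst : pvRowSet filters (pvFilterKeys filters) row = c.map (·.1) := by
          rw [pvRowSet_eq, hceq]
        have hSne : pvRowSet filters (pvFilterKeys filters) row ≠ [] := by
          have h1 : (pvRowSet filters (pvFilterKeys filters) row).length = c.length := by
            rw [hSfst, List.length_map]
          intro hnil
          rw [hnil] at h1
          simp at h1
          omega
        have hk := hmin row hrow hSne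
        have hlenS : (pvRowSet filters (pvFilterKeys filters) row).length = b.length := by
          rw [hSfst, List.length_map]; omega
        have hlex : pvLexLt (pvRowSet filters (pvFilterKeys filters) row) b = false := by
          simp only [pvKeyLt, Bool.or_eq_false_iff, Bool.and_eq_false_iff,
            decide_eq_false_iff_not, beq_eq_false_iff_ne, ne_eq] at hk
          rcases hk.2 with h | h
          · exact absurd hlenS h
          · exact h
        rw [hcbfst, ← hSfst]
        exact hlex
    rw [pvOuter_hit rows filters (pvFilterKeys filters) b.length _ hm1 (pvFilterKeys filters).length
      hmn hnone hsome]
    unfold pvMatched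
    apply List.filter_congr
    intro row hrow
    rw [Bool.eq_iff_iff]
    constructor
    · intro hsat
      have hcsub := (matched_all_iff rows filters (pvFilterKeys filters) _ row hcbsub).mp hsat
      have hceq := hsubeq _ row hrow hcbsub hcsub (by omega)
      have : pvRowSet filters (pvFilterKeys filters) row = b := by
        rw [pvRowSet_eq, ← hceq, hcbfst]
      simpa using this
    · intro hbeq
      have hSb : pvRowSet filters (pvFilterKeys filters) row = b := by simpa using hbeq
      have hSEeq : pvSE filters (pvFilterKeys filters) row = pvSE filters (pvFilterKeys filters) rw0 := by
        apply eq_of_map_fst_eq _ _ _ hEpw (pvSE_sublist _ _ _) hcbsub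
        rw [← pvRowSet_eq, hSb, hcbfst]
      apply (matched_all_iff rows filters (pvFilterKeys filters) _ row hcbsub).mpr
      rw [← hSEeq]
      exact List.Subset.refl _
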